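-- pv_equiv track=rewrite | github.com/greenmonn/daily-coding | python/sw-expert/mountain_road.py | get_highest_points
-- ===== SOURCE A (Python) =====
-- def get_highest_points(N, mountain):
--     highest_points = []
--     highest = 0
--     for row in range(N):
--         for col in range(N):
--             if mountain[row][col] > highest:
--                 highest = mountain[row][col]
--                 highest_points = [(row, col)]
--             elif mountain[row][col] == highest:
--                 highest_points.append((row, col))
--
--     return highest_points
-- ===== SOURCE B (Python) =====
-- def get_highest_points(N, mountain):
--     highest = 0
--     for row in range(N):
--         for col in range(N):
--             highest = max(highest, mountain[row][col])
--     return [(row, col) for row in range(N) for col in range(N)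
--             if mountain[row][col] == highest]
-- ===== Notes on version B (the rewrite author's own statement) =====
-- stated objective: simpler
-- what changed: Replaces A's single fused scan that maintains and rebuilds the candidate list whenever a new maximum appears with two separate passes: a running-max pass (seeded at 0, matching A's floor) followed by a row-major filtering comprehension.
import Mathlib
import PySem

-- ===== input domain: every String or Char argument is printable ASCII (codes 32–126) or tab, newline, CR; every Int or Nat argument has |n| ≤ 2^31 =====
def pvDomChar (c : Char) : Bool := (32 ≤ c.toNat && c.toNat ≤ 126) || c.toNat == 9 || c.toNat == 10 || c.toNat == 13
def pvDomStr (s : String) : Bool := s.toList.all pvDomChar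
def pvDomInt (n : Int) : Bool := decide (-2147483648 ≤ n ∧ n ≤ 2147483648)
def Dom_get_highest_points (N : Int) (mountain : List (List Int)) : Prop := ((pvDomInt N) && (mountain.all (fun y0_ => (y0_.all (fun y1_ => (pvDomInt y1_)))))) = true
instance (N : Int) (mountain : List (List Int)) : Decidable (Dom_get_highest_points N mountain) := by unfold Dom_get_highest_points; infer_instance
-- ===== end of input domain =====

-- B replaces A's fused scan (rebuilding the candidate list at each new maximum) with a
-- separate running-max pass followed by a row-major filtering pass; objective: simpler.


-- ===== PORT A =====
def get_highest_points (N : Int) (mountain : List (List Int)) : List (Int × Int) :=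
  ((PySem.List.pyRange 0 N 1).foldl (fun st row =>
      (PySem.List.pyRange 0 N 1).foldl (fun st col =>
        if PySem.List.pyGetD (PySem.List.pyGetD mountain row []) col 0 > st.2 then
          ([(row, col)], PySem.List.pyGetD (PySem.List.pyGetD mountain row []) col 0)
        else if PySem.List.pyGetD (PySem.List.pyGetD mountain row []) col 0 = st.2 then
          (st.1 ++ [(row, col)], st.2)
        else st) st)
      (([] : List (Int × Int)), (0 : Int))).1

-- ===== PORT B =====
-- B-side helper: the first pass (the running maximum, seeded at 0)
def pvHighest (N : Int) (mountain : List (List Int)) : Int :=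
  (PySem.List.pyRange 0 N 1).foldl (fun h row =>
    (PySem.List.pyRange 0 N 1).foldl (fun h col =>
      max h (PySem.List.pyGetD (PySem.List.pyGetD mountain row []) col 0)) h) 0

def get_highest_points_alt (N : Int) (mountain : List (List Int)) : List (Int × Int) :=
  (PySem.List.pyRange 0 N 1).flatMap (fun row =>
    ((PySem.List.pyRange 0 N 1).filter (fun col =>
      PySem.List.pyGetD (PySem.List.pyGetD mountain row []) col 0 = pvHighest N mountain)).map
      (fun col => (row, col)))

-- ===== PRECONDITION & SPEC =====
-- Pre_ excludes exactly the inputs on which A raises IndexError: some row index in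
-- range(N) beyond mountain, or some of the first N rows shorter than N.
def Pre_get_highest_points (N : Int) (mountain : List (List Int)) : Prop :=
  N ≤ (mountain.length : Int) ∧ ∀ r ∈ mountain.take N.toNat, N ≤ (r.length : Int)
instance (N : Int) (mountain : List (List Int)) : Decidable (Pre_get_highest_points N mountain) := by
  unfold Pre_get_highest_points; infer_instance
def pvWitness_get_highest_points : Int × List (List Int) := (2, [[1, 2], [3, 1]])

def Spec_get_highest_points (N : Int) (mountain : List (List Int)) (out : List (Int × Int)) : Prop := out = get_highest_points_alt N mountain
instance (N : Int) (mountain : List (List Int)) (out : List (Int × Int)) : Decidable (Spec_get_highest_points N mountain out) := by unfold Spec_get_highest_points; infer_instance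

-- ===== CLAIM (what is proved, stated in full; the proofs are below) =====
def Claim_equal_get_highest_points : Prop := ∀ (N : Int) (mountain : List (List Int)), Dom_get_highest_points N mountain → Pre_get_highest_points N mountain → Spec_get_highest_points N mountain (get_highest_points N mountain)

-- ===== LEMMAS AND PROOFS =====

-- value of a cell, as both ports read it
def pvVal (mountain : List (List Int)) (p : Int × Int) : Int :=
  PySem.List.pyGetD (PySem.List.pyGetD mountain p.1 []) p.2 0

-- row-major list of all cell coordinates
def pvCells (N : Int) : List (Int × Int) :=
  (PySem.List.pyRange 0 N 1).flatMap (fun row =>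
    (PySem.List.pyRange 0 N 1).map (fun col => (row, col)))

theorem pv_A_flat (mountain : List (List Int)) (cols : List Int) :
    ∀ (rows : List Int) (init : List (Int × Int) × Int),
      rows.foldl (fun st row =>
          cols.foldl (fun st col =>
            if PySem.List.pyGetD (PySem.List.pyGetD mountain row []) col 0 > st.2 then
              ([(row, col)], PySem.List.pyGetD (PySem.List.pyGetD mountain row []) col 0)
            else if PySem.List.pyGetD (PySem.List.pyGetD mountain row []) col 0 = st.2 then
              (st.1 ++ [(row, col)], st.2)
            else st) st) init
        = (rows.flatMap (fun row => cols.map (fun col => (row, col)))).foldl (fun st p =>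
            if pvVal mountain p > st.2 then ([p], pvVal mountain p)
            else if pvVal mountain p = st.2 then (st.1 ++ [p], st.2)
            else st) init := by
  intro rows
  induction rows with
  | nil => intro init; rfl
  | cons r t ih =>
    intro init
    simp only [List.foldl_cons, List.flatMap_cons, List.foldl_append, List.foldl_map, ih, pvVal]
    try rfl

theorem pv_B_flat (mountain : List (List Int)) (cols : List Int) :
    ∀ (rows : List Int) (init : Int),
      rows.foldl (fun h row =>
          cols.foldl (fun h col =>
            max h (PySem.List.pyGetD (PySem.List.pyGetD mountain row []) col 0)) h) init
        = (rows.flatMap (fun row => cols.map (fun col => (row, col)))).foldl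
            (fun h p => max h (pvVal mountain p)) init := by
  intro rows
  induction rows with
  | nil => intro init; rfl
  | cons r t ih =>
    intro init
    simp only [List.foldl_cons, List.flatMap_cons, List.foldl_append, List.foldl_map, ih, pvVal]
    try rfl

theorem pv_scan_char (mountain : List (List Int)) :
    ∀ (l : List (Int × Int)) (acc : List (Int × Int)) (h : Int),
      l.foldl (fun st p =>
          if pvVal mountain p > st.2 then ([p], pvVal mountain p)
          else if pvVal mountain p = st.2 then (st.1 ++ [p], st.2)
          else st) (acc, h)
        = ((if l.foldl (fun h p => max h (pvVal mountain p)) h = h then acc else [])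
            ++ l.filter (fun p => pvVal mountain p = l.foldl (fun h p => max h (pvVal mountain p)) h),
           l.foldl (fun h p => max h (pvVal mountain p)) h) := by
  intro l
  induction l with
  | nil => intro acc h; simp
  | cons p t ih =>
    intro acc h
    have hmax : h ≤ t.foldl (fun h q => max h (pvVal mountain q)) h :=
      (PySem.List.le_foldl_max_int t (pvVal mountain) h).1
    by_cases h1 : pvVal mountain p > h
    · have hm : max h (pvVal mountain p) = pvVal mountain p := by omega
      have hge : pvVal mountain p ≤ t.foldl (fun h q => max h (pvVal mountain q)) (pvVal mountain p) :=
        (PySem.List.le_foldl_max_int t (pvVal mountain) (pvVal mountain p)).1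
      simp only [List.foldl_cons, if_pos h1, hm, ih]
      by_cases h2 : t.foldl (fun h q => max h (pvVal mountain q)) (pvVal mountain p) = pvVal mountain p
      · simp [h2]
        intro hc; exact absurd hc (by omega)
      · have hne : t.foldl (fun h q => max h (pvVal mountain q)) (pvVal mountain p) ≠ h := by
          omega
        have hne' : pvVal mountain p ≠ t.foldl (fun h q => max h (pvVal mountain q)) (pvVal mountain p) := by
          omega
        simp [h2, hne, hne']
    · by_cases h2 : pvVal mountain p = h
      · have hm : max h (pvVal mountain p) = h := by omega
        simp only [List.foldl_cons, if_neg h1, if_pos h2, hm, ih]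
        by_cases h3 : t.foldl (fun h q => max h (pvVal mountain q)) h = h
        · simp [h3, h2]
        · have hne : pvVal mountain p ≠ t.foldl (fun h q => max h (pvVal mountain q)) h := by
            omega
          simp [h3, hne]
      · have hm : max h (pvVal mountain p) = h := by omega
        simp only [List.foldl_cons, if_neg h1, if_neg h2, hm, ih]
        have hne : pvVal mountain p ≠ t.foldl (fun h q => max h (pvVal mountain q)) h := by
          omega
        simp [hne]

theorem pv_A_eq (N : Int) (mountain : List (List Int)) :
    get_highest_points N mountain
      = (pvCells N).filter (fun p =>
          pvVal mountain p = (pvCells N).foldl (fun h p => max h (pvVal mountain p)) 0) := by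
  unfold get_highest_points pvCells
  rw [pv_A_flat, pv_scan_char]
  simp

theorem pv_B_eq (N : Int) (mountain : List (List Int)) :
    get_highest_points_alt N mountain
      = (pvCells N).filter (fun p =>
          pvVal mountain p = (pvCells N).foldl (fun h p => max h (pvVal mountain p)) 0) := by
  unfold get_highest_points_alt pvHighest pvCells
  rw [pv_B_flat]
  simp [List.filter_flatMap, List.filter_map, pvVal, Function.comp_def]
  rfl

-- ===== VERDICT (by name: the statement is the Claim_ definition above) =====
theorem get_highest_points_spec : Claim_equal_get_highest_points := by
  intro N mountain _ _
  unfold Spec_get_highest_points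
  rw [pv_A_eq, pv_B_eq]
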